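-- pv_equiv track=rewrite | github.com/Co336/USTC_Web_Teamwork | Lab1/Stage1/part-4 compress/compress.py | decompress_ids
-- ===== SOURCE A (Python) =====
-- def varint_decode(data):
--     shift = 0
--     result = 0
--     for index, byte in enumerate(data):
--         result |= (byte & 0x7F) << shift
--         shift += 7
--         if not (byte & 0x80):  # 检测无继续位
--             return result, index + 1  # 返回值和读取字节数
--     raise ValueError("Incomplete Varint data")
--
-- def decompress_ids(compressed):
--     index = 0
--     base_id, offset = varint_decode(compressed[index:])  # 解码基准ID
--     index += offset
--     gaps = []
--     while index < len(compressed):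
--         gap, offset = varint_decode(compressed[index:])
--         gaps.append(gap)
--         index += offset
--     ids = [base_id]  # 构建还原的 ID 列表
--     for gap in gaps:
--         ids.append(ids[-1] + gap)  # 通过差值还原完整ID
--     return list(map(str, ids))
-- ===== SOURCE B (Python) =====
-- def decompress_ids(compressed):
--     # Single pass with in-line varint decoding and fused prefix summing:
--     # no slicing, no intermediate gaps list, no second reconstruction loop.
--     ids = []
--     prev = 0
--     value = 0
--     shift = 0
--     for byte in compressed:
--         value |= (byte & 0x7F) << shift
--         shift += 7
--         if not (byte & 0x80):
--             prev += value
--             ids.append(str(prev))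
--             value = 0
--             shift = 0
--     if shift or not ids:
--         raise ValueError("Incomplete Varint data")
--     return ids
-- ===== Notes on version B (the rewrite author's own statement) =====
-- stated objective: faster
-- what changed: B decodes in one pass over the byte list with in-line varint state (no per-varint re-slicing of the buffer) and fuses the prefix-sum reconstruction into the same loop, instead of A's slice-per-varint scan followed by a second loop rebuilding ids from a gaps list.
import Mathlib
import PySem

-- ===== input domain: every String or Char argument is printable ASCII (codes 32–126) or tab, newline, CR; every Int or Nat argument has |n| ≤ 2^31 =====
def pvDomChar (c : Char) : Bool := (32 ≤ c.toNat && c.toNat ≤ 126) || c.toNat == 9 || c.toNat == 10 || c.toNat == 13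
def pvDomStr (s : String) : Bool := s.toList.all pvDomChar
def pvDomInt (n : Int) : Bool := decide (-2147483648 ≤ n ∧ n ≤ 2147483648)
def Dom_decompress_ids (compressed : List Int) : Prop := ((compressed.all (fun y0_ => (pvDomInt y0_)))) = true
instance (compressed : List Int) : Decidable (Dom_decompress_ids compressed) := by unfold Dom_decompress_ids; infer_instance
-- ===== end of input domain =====

-- B: one pass with in-line varint state and fused prefix summing, instead of A's
-- slice-per-varint decode plus a second reconstruction loop (faster: no re-slicing).


-- ===== PORT A =====
-- varint_decode(data): loop over enumerate(data) with (shift, result); returns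
-- (value, bytes read). none = the trailing 'raise ValueError' (excluded by Pre_).
def varintDecodeA : List Int → Nat → Int → Nat → Option (Int × Nat)
  | [], _, _, _ => none
  | b :: rest, shift, result, index =>
    let result := PySem.Int.bor result ((PySem.Int.band b 127) <<< shift)
    if PySem.Int.band b 128 = 0 then some (result, index + 1)
    else varintDecodeA rest (shift + 7) result (index + 1)

-- termination fact the while-loop below needs: a decode always reads ≥ 1 byte
theorem varintDecodeA_pos : ∀ (data : List Int) (shift : Nat) (result : Int)
    (index : Nat) (v : Int) (o : Nat),
    varintDecodeA data shift result index = some (v, o) → index < o := by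
  intro data
  induction data with
  | nil => intro _ _ _ _ _ h; simp [varintDecodeA] at h
  | cons b rest ih =>
    intro shift result index v o h
    simp only [varintDecodeA] at h
    split at h
    · simp at h; omega
    · exact Nat.lt_of_succ_lt (ih _ _ _ _ _ h)

-- the 'while index < len(compressed)' loop collecting gaps; compressed[index:] is
-- List.drop index (index is a nonnegative Python int here, so drop is exact).
-- none from a decode = ValueError: the loop returns gaps as-is (excluded by Pre_).
def gapsLoopA (compressed : List Int) (index : Nat) (gaps : List Int) : List Int :=
  if h : index < compressed.length then
    match hd : varintDecodeA (compressed.drop index) 0 0 0 with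
    | none => gaps
    | some (gap, offset) => gapsLoopA compressed (index + offset) (gaps ++ [gap])
  else gaps
termination_by compressed.length - index
decreasing_by
  have := varintDecodeA_pos _ _ _ _ _ _ hd
  omega

def decompress_ids (compressed : List Int) : List String :=
  match varintDecodeA compressed 0 0 0 with   -- compressed[0:] = compressed
  | none => []  -- ValueError (e.g. empty input); excluded by Pre_
  | some (base_id, offset) =>
    let gaps := gapsLoopA compressed offset []
    -- ids = [base_id]; for gap in gaps: ids.append(ids[-1] + gap)
    let ids := gaps.foldl (fun ids gap => ids ++ [(ids.getLast?.getD 0) + gap]) [base_id]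
    ids.map PySem.Int.toStr

-- ===== PORT B =====
-- state (ids, prev, value, shift); the trailing incomplete-data check in Source B only
-- fires where A also raises (outside Pre_), so the port just returns ids.
def stepB (s : List String × Int × Int × Nat) (b : Int) : List String × Int × Int × Nat :=
  match s with
  | (ids, prev, value, shift) =>
    let value := PySem.Int.bor value ((PySem.Int.band b 127) <<< shift)
    let shift := shift + 7
    if PySem.Int.band b 128 = 0 then
      (ids ++ [PySem.Int.toStr (prev + value)], prev + value, 0, 0)
    else (ids, prev, value, shift)

def decompress_ids_alt (compressed : List Int) : List String :=
  (compressed.foldl stepB ([], 0, 0, 0)).1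

-- ===== PRECONDITION & SPEC =====
-- Pre_ excludes exactly the inputs where A raises ValueError ("Incomplete Varint
-- data"): the empty list and lists whose last byte has the continuation bit set.
-- (Source B raises on exactly the same inputs.)
def Pre_decompress_ids (compressed : List Int) : Prop :=
  compressed ≠ [] ∧ PySem.Int.band (compressed.getLast?.getD 0) 128 = 0
instance (compressed : List Int) : Decidable (Pre_decompress_ids compressed) := by
  unfold Pre_decompress_ids; infer_instance

def pvWitness_decompress_ids : List Int := [5, 130, 1, 7]

def Spec_decompress_ids (compressed : List Int) (out : List String) : Prop := out = decompress_ids_alt compressed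
instance (compressed : List Int) (out : List String) : Decidable (Spec_decompress_ids compressed out) := by unfold Spec_decompress_ids; infer_instance

-- ===== CLAIM (what is proved, stated in full; the proofs are below) =====
def Claim_equal_decompress_ids : Prop := ∀ (compressed : List Int), Dom_decompress_ids compressed → Pre_decompress_ids compressed → Spec_decompress_ids compressed (decompress_ids compressed)

-- ===== LEMMAS AND PROOFS =====

-- the common semantic view: the varint values of the byte stream (greedy split
-- at bytes without the 0x80 continuation bit), carried state (shift, value)
def vvals : List Int → Nat → Int → List Int
  | [], _, _ => []
  | b :: rest, shift, value =>
    let v := PySem.Int.bor value ((PySem.Int.band b 127) <<< shift)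
    if PySem.Int.band b 128 = 0 then v :: vvals rest 0 0
    else vvals rest (shift + 7) v

-- cumulative-sum strings of a gap list from a running previous id
def cumStrs : Int → List Int → List String
  | _, [] => []
  | prev, v :: vs => PySem.Int.toStr (prev + v) :: cumStrs (prev + v) vs

def lastTerm (xs : List Int) : Prop :=
  xs = [] ∨ PySem.Int.band (xs.getLast?.getD 0) 128 = 0

theorem lastTerm_drop (xs : List Int) (n : Nat) (h : lastTerm xs) :
    lastTerm (xs.drop n) := by
  rcases h with h | h
  · subst h; left; simp
  · by_cases hd : xs.drop n = []
    · left; exact hd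
    · right
      have hx : xs ≠ [] := by
        intro hx; subst hx; simp at hd
      have : (xs.drop n).getLast? = xs.getLast? := by
        rw [List.getLast?_eq_some_getLast hd, List.getLast?_eq_some_getLast hx,
            List.getLast_drop]
      rw [this]; exact h

theorem exists_term_of_lastTerm (xs : List Int) (hne : xs ≠ []) (h : lastTerm xs) :
    ∃ b ∈ xs, PySem.Int.band b 128 = 0 := by
  rcases h with h | h
  · exact absurd h hne
  · refine ⟨xs.getLast hne, List.getLast_mem hne, ?_⟩
    rw [List.getLast?_eq_some_getLast hne] at h
    simpa using h

-- decoding one varint: value, positive offset, and how vvals splits at it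
theorem varintDecodeA_vvals : ∀ (data : List Int) (shift : Nat) (value : Int) (i : Nat),
    (∃ b ∈ data, PySem.Int.band b 128 = 0) →
    ∃ v o, varintDecodeA data shift value i = some (v, i + o) ∧ 0 < o ∧
      o ≤ data.length ∧ vvals data shift value = v :: vvals (data.drop o) 0 0 := by
  intro data
  induction data with
  | nil => intro _ _ _ h; simp at h
  | cons b rest ih =>
    intro shift value i hex
    by_cases hb : PySem.Int.band b 128 = 0
    · refine ⟨PySem.Int.bor value ((PySem.Int.band b 127) <<< shift), 1, ?_,
        Nat.one_pos, by simp, ?_⟩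
      · simp [varintDecodeA, hb]
      · simp [vvals, hb]
    · have hex' : ∃ x ∈ rest, PySem.Int.band x 128 = 0 := by
        rcases hex with ⟨x, hx, hxt⟩
        rcases List.mem_cons.mp hx with rfl | hx
        · exact absurd hxt hb
        · exact ⟨x, hx, hxt⟩
      obtain ⟨v, o, heq, hpos, hle, hvals⟩ :=
        ih (shift + 7) (PySem.Int.bor value ((PySem.Int.band b 127) <<< shift)) (i + 1) hex'
      refine ⟨v, o + 1, ?_, by omega, by simp only [List.length_cons]; omega, ?_⟩
      · simp only [varintDecodeA, if_neg hb]
        rw [heq]; congr 2; omega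
      · simp only [vvals, if_neg hb]
        rw [hvals]; simp

-- the gaps loop computes the varint values of the remaining buffer
theorem gapsLoopA_vvals (compressed : List Int) (index : Nat) (gaps : List Int) :
    lastTerm compressed →
    gapsLoopA compressed index gaps = gaps ++ vvals (compressed.drop index) 0 0 := by
  intro hlt
  induction index, gaps using gapsLoopA.induct compressed with
  | case1 index gaps h hd =>
    -- varintDecodeA returned none: impossible under lastTerm
    have hne : compressed.drop index ≠ [] := by
      intro hx
      have := List.drop_eq_nil_iff.mp hx
      omega
    obtain ⟨v, o, heq, _, _, _⟩ :=
      varintDecodeA_vvals (compressed.drop index) 0 0 0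
        (exists_term_of_lastTerm _ hne (lastTerm_drop _ _ hlt))
    rw [hd] at heq
    exact absurd heq (by simp)
  | case2 index gaps h gap offset hd ih =>
    have hne : compressed.drop index ≠ [] := by
      intro hx
      have := List.drop_eq_nil_iff.mp hx
      omega
    obtain ⟨v, o, heq, hpos, hle, hvals⟩ :=
      varintDecodeA_vvals (compressed.drop index) 0 0 0
        (exists_term_of_lastTerm _ hne (lastTerm_drop _ _ hlt))
    simp only [Nat.zero_add] at heq
    rw [hd] at heq
    obtain ⟨rfl, rfl⟩ : gap = v ∧ offset = o := by
      have := Option.some.inj heq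
      exact ⟨congrArg Prod.fst this, congrArg Prod.snd this⟩
    rw [gapsLoopA, dif_pos h]
    split
    · next hnone => simp [hd] at hnone
    · next g o' hsome =>
      rw [hd] at hsome
      obtain ⟨rfl, rfl⟩ : gap = g ∧ offset = o' := by
        have := Option.some.inj hsome
        exact ⟨congrArg Prod.fst this, congrArg Prod.snd this⟩
      rw [ih, hvals]
      simp [List.drop_drop]
  | case3 index gaps h =>
    rw [gapsLoopA, dif_neg h]
    have : compressed.drop index = [] := by
      rw [List.drop_eq_nil_iff]; omega
    rw [this]; simp [vvals]

-- A's reconstruction fold, mapped through str, is cumStrs of the gaps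
theorem foldIds_cumStrs : ∀ (gaps prefixl : List Int) (lastv : Int),
    ((gaps.foldl (fun ids gap => ids ++ [(ids.getLast?.getD 0) + gap])
        (prefixl ++ [lastv])).map PySem.Int.toStr)
      = (prefixl ++ [lastv]).map PySem.Int.toStr ++ cumStrs lastv gaps := by
  intro gaps
  induction gaps with
  | nil => intro _ _; simp [cumStrs]
  | cons g gs ih =>
    intro prefixl lastv
    rw [List.foldl_cons]
    have hlast : (((prefixl ++ [lastv]).getLast?).getD 0) = lastv := by simp
    rw [hlast]
    have := ih (prefixl ++ [lastv]) (lastv + g)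
    simp only [List.append_assoc, List.singleton_append] at this ⊢
    rw [this]
    simp [cumStrs]

-- B's fold is cumStrs of vvals
theorem foldB_cumStrs : ∀ (data : List Int) (ids : List String) (prev value : Int) (shift : Nat),
    (data.foldl stepB (ids, prev, value, shift)).1
      = ids ++ cumStrs prev (vvals data shift value) := by
  intro data
  induction data with
  | nil => intro _ _ _ _; simp [vvals, cumStrs]
  | cons b rest ih =>
    intro ids prev value shift
    simp only [List.foldl_cons, stepB]
    by_cases hb : PySem.Int.band b 128 = 0
    · simp only [if_pos hb]
      rw [ih]
      simp [vvals, hb, cumStrs]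
    · simp only [if_neg hb]
      rw [ih]
      simp [vvals, hb]

-- ===== VERDICT (by name: the statement is the Claim_ definition above) =====
theorem decompress_ids_spec : Claim_equal_decompress_ids := by
  unfold Claim_equal_decompress_ids
  intro compressed _ hpre
  unfold Spec_decompress_ids
  obtain ⟨hne, hlast⟩ := hpre
  have hlt : lastTerm compressed := Or.inr hlast
  obtain ⟨v, o, heq, hpos, hle, hvals⟩ :=
    varintDecodeA_vvals compressed 0 0 0 (exists_term_of_lastTerm _ hne hlt)
  simp only [Nat.zero_add] at heq
  unfold decompress_ids decompress_ids_alt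
  rw [heq, foldB_cumStrs compressed [] 0 0 0]
  dsimp only
  rw [gapsLoopA_vvals compressed o [] hlt]
  simp only [List.nil_append]
  have hfold := foldIds_cumStrs (vvals (compressed.drop o) 0 0) [] v
  simp only [List.nil_append] at hfold
  rw [hfold, hvals]
  simp [cumStrs]
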